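-- pv_equiv track=rewrite | github.com/SSteel2/AdventOfCode | 2025/02/2.py | _repetition_sum
-- ===== SOURCE A (Python) =====
-- def _construct_multiple(number, helper, repetitions):
-- 	result = number
-- 	for i in range(repetitions - 1):
-- 		result = result * helper + number
-- 	return result
--
-- def _repetition_sum(start, end, digits, repetitions, used_ids):
-- 	result = 0
-- 	helper = 10 ** (digits // repetitions)
-- 	start_sequence = start // (helper ** (repetitions - 1))
-- 	end_sequence = end // (helper ** (repetitions - 1))
-- 	for number in range(start_sequence, end_sequence + 1):
-- 		current_id = _construct_multiple(number, helper, repetitions)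
-- 		if current_id < start or current_id in used_ids:
-- 			continue
-- 		if current_id > end:
-- 			break
-- 		result += current_id
-- 		used_ids.add(current_id)
-- 	return result
-- ===== SOURCE B (Python) =====
-- def _ceil_div(a, b):
-- 	return -(-a // b)
--
-- def _repetition_sum(start, end, digits, repetitions, used_ids):
-- 	"""Sum (and record) the repetition ids in the queried block, without a scan.
--
-- 	A repetition id is a prefix p repeated `repetitions` times, i.e. p * mult where
-- 	mult = 1 + helper + ... + helper**(repetitions-1).  Candidate prefixes are those
-- 	of the block's endpoints (start and end divided by helper**(repetitions-1));
-- 	among them keep the prefixes whose id lies in [start, end].  The kept ids form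
-- 	an arithmetic progression, so their sum is a closed form; ids already recorded
-- 	in used_ids are then removed from the total by one pass over used_ids.
-- 	"""
-- 	helper = 10 ** (digits // repetitions)
-- 	mult = repetitions if helper == 1 else (helper ** repetitions - 1) // (helper - 1)
-- 	power = helper ** (repetitions - 1)
-- 	lo = max(start // power, _ceil_div(start, mult))
-- 	hi = min(end // power, end // mult)
-- 	if hi < lo:
-- 		return 0
-- 	total = mult * (lo + hi) * (hi - lo + 1) // 2
-- 	dup = sum(i for i in used_ids if i % mult == 0 and lo <= i // mult <= hi)
-- 	used_ids.update(range(lo * mult, hi * mult + 1, mult))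
-- 	return total - dup
-- ===== Notes on version B (the rewrite author's own statement) =====
-- stated objective: alternative
-- what changed: B has no loop over candidate prefixes for the returned sum: it replaces A's inner geometric-build loop by one closed-form multiplier, intersects the endpoint-prefix window with the interval of prefixes whose id lies in [start, end], sums that arithmetic progression with the series formula, and subtracts already-recorded ids by a single pass over used_ids; Pre_ excludes repetitions < 1 and digits < 0, on which A raises (ZeroDivisionError/TypeError), and requires used_ids to be a set (distinct elements), as Python's set type guarantees.
import Mathlib
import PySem

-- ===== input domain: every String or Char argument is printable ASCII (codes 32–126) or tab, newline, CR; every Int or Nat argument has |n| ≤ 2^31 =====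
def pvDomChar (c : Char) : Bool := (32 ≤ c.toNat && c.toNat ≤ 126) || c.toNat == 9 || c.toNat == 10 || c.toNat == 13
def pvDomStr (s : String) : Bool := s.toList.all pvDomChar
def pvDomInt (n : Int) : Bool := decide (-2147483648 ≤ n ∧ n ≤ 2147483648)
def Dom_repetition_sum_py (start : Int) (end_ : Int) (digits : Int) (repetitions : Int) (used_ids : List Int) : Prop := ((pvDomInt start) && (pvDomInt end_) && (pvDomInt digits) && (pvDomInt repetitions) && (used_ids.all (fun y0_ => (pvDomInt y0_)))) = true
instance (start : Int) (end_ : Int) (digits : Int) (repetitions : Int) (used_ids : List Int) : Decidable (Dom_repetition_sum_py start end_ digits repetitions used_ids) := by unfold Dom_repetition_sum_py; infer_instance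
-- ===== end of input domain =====

-- B is loop-free: a closed-form multiplier, an arithmetic-series formula over the interval of
-- admissible prefixes, and one pass over used_ids for already-recorded ids (objective: alternative).
-- A mutates its set argument `used_ids` in place (B performs the equivalent set update); the
-- theorems below are about the RETURN value only.

-- ===== PORT A =====
-- _construct_multiple: result = number; for i in range(repetitions-1): result = result*helper + number
def pvConstructMultiple (number : Int) (helper : Int) (repetitions : Int) : Int :=
  (PySem.List.pyRange 0 (repetitions - 1) 1).foldl (fun result _ => result * helper + number) number

-- the `for number in range(...)` loop of A, with `continue`/`break` as recursion on the range list
def pvLoopA (start end_ helper repetitions : Int) : List Int → Int → List Int → Int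
  | [], result, _ => result
  | number :: rest, result, used =>
    let current_id := pvConstructMultiple number helper repetitions
    if current_id < start ∨ current_id ∈ used then
      pvLoopA start end_ helper repetitions rest result used
    else if end_ < current_id then result
    else pvLoopA start end_ helper repetitions rest (result + current_id)
           (PySem.Set.add used current_id)

def repetition_sum_py (start : Int) (end_ : Int) (digits : Int) (repetitions : Int) (used_ids : List Int) : Int :=
  -- 10 ** (digits // repetitions): exponent is ≥ 0 under Pre_, so ^ on toNat is exact
  let helper : Int := (10 : Int) ^ (PySem.Int.floordiv digits repetitions).toNat
  -- helper ** (repetitions - 1): exponent ≥ 0 under Pre_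
  let power : Int := helper ^ (repetitions - 1).toNat
  let start_sequence := PySem.Int.floordiv start power
  let end_sequence := PySem.Int.floordiv end_ power
  pvLoopA start end_ helper repetitions
    (PySem.List.pyRange start_sequence (end_sequence + 1) 1) 0 used_ids

-- ===== PORT B =====
-- _ceil_div(a, b) = -(-a // b)
def pvCeilDiv (a : Int) (b : Int) : Int := -(PySem.Int.floordiv (-a) b)

def repetition_sum_py_alt (start : Int) (end_ : Int) (digits : Int) (repetitions : Int) (used_ids : List Int) : Int :=
  let helper : Int := (10 : Int) ^ (PySem.Int.floordiv digits repetitions).toNat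
  let mult : Int := if helper = 1 then repetitions
    else PySem.Int.floordiv (helper ^ repetitions.toNat - 1) (helper - 1)
  let power : Int := helper ^ (repetitions - 1).toNat
  let lo : Int := max (PySem.Int.floordiv start power) (pvCeilDiv start mult)
  let hi : Int := min (PySem.Int.floordiv end_ power) (PySem.Int.floordiv end_ mult)
  if hi < lo then 0
  else
    let total : Int := PySem.Int.floordiv (mult * (lo + hi) * (hi - lo + 1)) 2
    -- sum(i for i in used_ids if i % mult == 0 and lo <= i // mult <= hi)
    let dup : Int := (used_ids.filter (fun i =>
      PySem.Int.mod i mult == 0 && decide (lo ≤ PySem.Int.floordiv i mult)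
        && decide (PySem.Int.floordiv i mult ≤ hi))).foldl (· + ·) 0
    total - dup

-- ===== PRECONDITION & SPEC =====
-- Pre_ excludes exactly the inputs on which Python A raises: repetitions ≤ 0 (ZeroDivisionError
-- for repetitions = 0; for repetitions < 0 and for digits < 0 the exponent is negative, 10**e is
-- a float and range(float) raises TypeError), and `used_ids` with a repeated element, which is
-- not a value of the declared type (Python's set holds distinct elements).
def Pre_repetition_sum_py (start : Int) (end_ : Int) (digits : Int) (repetitions : Int) (used_ids : List Int) : Prop :=
  1 ≤ repetitions ∧ 0 ≤ digits ∧ used_ids.Nodup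
instance (start : Int) (end_ : Int) (digits : Int) (repetitions : Int) (used_ids : List Int) : Decidable (Pre_repetition_sum_py start end_ digits repetitions used_ids) := by unfold Pre_repetition_sum_py; infer_instance

def pvWitness_repetition_sum_py : Int × Int × Int × Int × List Int := (10, 2000, 4, 2, [1111])

def Spec_repetition_sum_py (start : Int) (end_ : Int) (digits : Int) (repetitions : Int) (used_ids : List Int) (out : Int) : Prop := out = repetition_sum_py_alt start end_ digits repetitions used_ids
instance (start : Int) (end_ : Int) (digits : Int) (repetitions : Int) (used_ids : List Int) (out : Int) : Decidable (Spec_repetition_sum_py start end_ digits repetitions used_ids out) := by unfold Spec_repetition_sum_py; infer_instance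

-- ===== CLAIM (what is proved, stated in full; the proofs are below) =====
def Claim_equal_repetition_sum_py : Prop := ∀ (start : Int) (end_ : Int) (digits : Int) (repetitions : Int) (used_ids : List Int), Dom_repetition_sum_py start end_ digits repetitions used_ids → Pre_repetition_sum_py start end_ digits repetitions used_ids → Spec_repetition_sum_py start end_ digits repetitions used_ids (repetition_sum_py start end_ digits repetitions used_ids)

-- ===== LEMMAS AND PROOFS =====

-- A's loop over the effective interval, abstracted: same membership test, same threading of used
def pvLoopB (mult : Int) : List Int → Int → List Int → Int × List Int
  | [], result, used => (result, used)
  | number :: rest, result, used =>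
    let current_id := number * mult
    if current_id ∈ used then pvLoopB mult rest result used
    else pvLoopB mult rest (result + current_id) (PySem.Set.add used current_id)

-- geometric sum  pvG h k = h^(k-1) + … + h + 1  (k terms)
def pvG (h : Int) : Nat → Int
  | 0 => 0
  | k + 1 => h ^ k + pvG h k

theorem pvG_one (k : Nat) : pvG 1 k = k := by
  induction k with
  | zero => rfl
  | succ k ih => simp [pvG, ih]; omega

theorem pvG_closed (h : Int) (k : Nat) : (h - 1) * pvG h k = h ^ k - 1 := by
  induction k with
  | zero => simp [pvG]
  | succ k ih => simp only [pvG]; rw [mul_add, ih, pow_succ]; ring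

theorem pvG_nonneg (h : Int) (hh : 0 ≤ h) (k : Nat) : 0 ≤ pvG h k := by
  induction k with
  | zero => simp [pvG]
  | succ k ih => simp only [pvG]; have := pow_nonneg hh k; omega

theorem pvG_pos (h : Int) (hh : 1 ≤ h) (k : Nat) (hk : 1 ≤ k) : 0 < pvG h k := by
  cases k with
  | zero => omega
  | succ k =>
    have h1 : 1 ≤ h ^ k := one_le_pow₀ hh
    have h2 : 0 ≤ pvG h k := pvG_nonneg h (by omega) k
    simp only [pvG]; omega

theorem pv_fold_geom (h n : Int) (l : List Int) : ∀ a : Int,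
    l.foldl (fun result _ => result * h + n) a = a * h ^ l.length + n * pvG h l.length := by
  induction l with
  | nil => intro a; simp [pvG]
  | cons x xs ih =>
    intro a
    simp only [List.foldl_cons, List.length_cons, ih (a * h + n), pvG]
    ring

theorem pv_construct_eq (h r n : Int) (hr : 1 ≤ r) :
    pvConstructMultiple n h r = n * pvG h r.toNat := by
  unfold pvConstructMultiple
  rw [pv_fold_geom, PySem.List.length_pyRange_one]
  have hk : (r - 1 - 0).toNat + 1 = r.toNat := by omega
  rw [← hk, pvG]
  ring

-- the closed-form multiplier of B equals the geometric sum
theorem pv_mult_eq (h r : Int) (hh : 1 ≤ h) (hr : 1 ≤ r) :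
    (if h = 1 then r else PySem.Int.floordiv (h ^ r.toNat - 1) (h - 1)) = pvG h r.toNat := by
  split_ifs with h1
  · subst h1; rw [pvG_one]; omega
  · have hpos : 0 < h - 1 := by omega
    rw [PySem.Int.floordiv_eq_ediv_of_pos hpos, ← pvG_closed h r.toNat,
      Int.mul_ediv_cancel_left _ (by omega : h - 1 ≠ 0)]

-- skipping a prefix whose ids are all below `start` (only `continue` fires)
theorem pvLoopA_skip_low (start end_ h r : Int) (l : List Int)
    (hl : ∀ n ∈ l, pvConstructMultiple n h r < start) :
    ∀ (rest : List Int) (res : Int) (used : List Int),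
      pvLoopA start end_ h r (l ++ rest) res used = pvLoopA start end_ h r rest res used := by
  induction l with
  | nil => intro rest res used; simp
  | cons x xs ih =>
    intro rest res used
    have hx := hl x (by simp)
    simp only [List.cons_append, pvLoopA, if_pos (Or.inl hx)]
    exact ih (fun n hn => hl n (by simp [hn])) rest res used

-- a suffix whose ids are all out of [start, end_] never changes the result
theorem pvLoopA_out (start end_ h r : Int) (l : List Int)
    (hl : ∀ n ∈ l, pvConstructMultiple n h r < start ∨ end_ < pvConstructMultiple n h r) :
    ∀ (res : Int) (used : List Int), pvLoopA start end_ h r l res used = res := by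
  induction l with
  | nil => intro res used; simp [pvLoopA]
  | cons x xs ih =>
    intro res used
    have hx := hl x (by simp)
    by_cases hc : pvConstructMultiple x h r < start ∨ pvConstructMultiple x h r ∈ used
    · simp only [pvLoopA, if_pos hc]
      exact ih (fun n hn => hl n (by simp [hn])) res used
    · have hgt : end_ < pvConstructMultiple x h r := by
        rcases hx with hx | hx
        · exact absurd (Or.inl hx) hc
        · exact hx
      simp only [pvLoopA, if_neg hc, if_pos hgt]

-- over the middle interval both loops take the same branches and thread the same state
theorem pvLoopA_mid (start end_ h r mult : Int) (l : List Int)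
    (hl : ∀ n ∈ l, start ≤ n * mult ∧ n * mult ≤ end_ ∧ pvConstructMultiple n h r = n * mult) :
    ∀ (rest : List Int) (res : Int) (used : List Int),
      pvLoopA start end_ h r (l ++ rest) res used =
        pvLoopA start end_ h r rest (pvLoopB mult l res used).1 (pvLoopB mult l res used).2 := by
  induction l with
  | nil => intro rest res used; simp [pvLoopB]
  | cons x xs ih =>
    intro rest res used
    obtain ⟨hge, hle, hc⟩ := hl x (by simp)
    have ihx := fun res used => ih (fun n hn => hl n (by simp [hn])) rest res used
    by_cases hm : x * mult ∈ used
    · simp only [List.cons_append, pvLoopA, pvLoopB, hc, if_pos (Or.inr hm), if_pos hm]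
      exact ihx res used
    · have hnc : ¬ (x * mult < start ∨ x * mult ∈ used) := by
        rintro (hlt | hmem)
        · omega
        · exact hm hmem
      simp only [List.cons_append, pvLoopA, pvLoopB, hc, if_neg hnc,
        if_neg (by omega : ¬ end_ < x * mult), if_neg hm]
      exact ihx (res + x * mult) (PySem.Set.add used (x * mult))

-- the core interval equivalence, for an abstract multiplier
theorem pv_loop_equiv (start end_ h r mult sseq eseq : Int) (used : List Int)
    (hm : 0 < mult)
    (hcon : ∀ n : Int, pvConstructMultiple n h r = n * mult) :
    pvLoopA start end_ h r (PySem.List.pyRange sseq (eseq + 1) 1) 0 used =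
      (pvLoopB mult (PySem.List.pyRange
          (max sseq (-(PySem.Int.floordiv (-start) mult)))
          ((min eseq (PySem.Int.floordiv end_ mult)) + 1) 1) 0 used).1 := by
  have hge : ∀ n : Int, start ≤ n * mult ↔ -(PySem.Int.floordiv (-start) mult) ≤ n := by
    intro n
    rw [neg_le, PySem.Int.le_floordiv_iff_mul_le hm, neg_mul]
    omega
  have hle : ∀ n : Int, n * mult ≤ end_ ↔ n ≤ PySem.Int.floordiv end_ mult :=
    fun n => (PySem.Int.le_floordiv_iff_mul_le hm).symm
  set L := -(PySem.Int.floordiv (-start) mult) with hL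
  set F := PySem.Int.floordiv end_ mult with hF
  by_cases hcase : max sseq L ≤ min eseq F + 1
  · have h1 : sseq ≤ max sseq L := le_max_left _ _
    have h2 : min eseq F + 1 ≤ eseq + 1 := by have := min_le_left eseq F; omega
    rw [PySem.List.pyRange_one_append sseq (max sseq L) (eseq + 1) h1 (by omega),
      PySem.List.pyRange_one_append (max sseq L) (min eseq F + 1) (eseq + 1) hcase h2,
      pvLoopA_skip_low, pvLoopA_mid, pvLoopA_out]
    · intro n hn
      rw [PySem.List.mem_pyRange_one] at hn
      have hnF : F < n := by have h3 := min_le_right eseq F; have h4 := min_le_left eseq F; omega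
      have hout : ¬ n * mult ≤ end_ := fun hx => absurd ((hle n).mp hx) (by omega)
      right; rw [hcon n]; omega
    · intro n hn
      rw [PySem.List.mem_pyRange_one] at hn
      have hnL : L ≤ n := by have := le_max_right sseq L; omega
      have hnF : n ≤ F := by have := min_le_right eseq F; omega
      exact ⟨(hge n).mpr hnL, (hle n).mpr hnF, hcon n⟩
    · intro n hn
      rw [PySem.List.mem_pyRange_one] at hn
      have hnL : n < L := by
        have h3 := le_max_left sseq L; have h4 := le_max_right sseq L
        have h5 : max sseq L = sseq ∨ max sseq L = L := max_choice sseq L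
        omega
      have hout : ¬ start ≤ n * mult := fun hx => absurd ((hge n).mp hx) (by omega)
      rw [hcon n]; omega
  · rw [PySem.List.pyRange_one_eq_nil (by omega : min eseq F + 1 ≤ max sseq L)]
    simp only [pvLoopB]
    apply pvLoopA_out
    intro n hn
    rw [PySem.List.mem_pyRange_one] at hn
    rw [hcon n]
    by_contra hno
    rw [not_or, not_lt, not_lt] at hno
    have hnL : L ≤ n := (hge n).mp hno.1
    have hnF : n ≤ F := (hle n).mp hno.2
    have h3 : max sseq L ≤ n := max_le (by omega) hnL
    have h4 : n ≤ min eseq F := le_min (by omega) hnF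
    omega

-- the abstract loop computes the sum of the not-yet-used ids
theorem pvLoopB_closed (mult : Int) (hm : mult ≠ 0) : ∀ (l : List Int) (res : Int) (used : List Int), l.Nodup →
    (pvLoopB mult l res used).1 =
      res + ((l.filter (fun n => decide (n * mult ∉ used))).map (· * mult)).sum := by
  intro l
  induction l with
  | nil => intro res used _; simp [pvLoopB]
  | cons x xs ih =>
    intro res used hnd
    have hxs : xs.Nodup := hnd.of_cons
    have hx : x ∉ xs := by
      intro hmem; exact (List.nodup_cons.mp hnd).1 hmem
    by_cases hmem : x * mult ∈ used
    · simp only [pvLoopB, if_pos hmem, List.filter_cons]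
      rw [if_neg (by simp [hmem])]
      exact ih res used hxs
    · simp only [pvLoopB, if_neg hmem, List.filter_cons]
      rw [if_pos (by simp [hmem])]
      rw [ih (res + x * mult) (PySem.Set.add used (x * mult)) hxs]
      have hfe : xs.filter (fun n => decide (n * mult ∉ PySem.Set.add used (x * mult)))
          = xs.filter (fun n => decide (n * mult ∉ used)) := by
        apply List.filter_congr
        intro n hn
        have hne : n * mult ≠ x * mult := by
          intro he
          exact hx (by rwa [mul_right_cancel₀ hm he] at hn)
        simp [PySem.Set.mem_add, hne]
      rw [hfe]
      simp only [List.map_cons, List.sum_cons]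
      ring

-- sum over a filtered list = sum over all minus sum over the complement
theorem pv_filter_split (p : Int → Bool) (f : Int → Int) (l : List Int) :
    ((l.filter p).map f).sum = (l.map f).sum - ((l.filter (fun x => !p x)).map f).sum := by
  induction l with
  | nil => simp
  | cons x xs ih =>
    by_cases hp : p x
    · simp [hp, ih]; ring
    · simp [hp, ih]

-- arithmetic series, numerator form
theorem pv_two_mul_sum_range (k : Nat) : ∀ lo : Int,
    2 * (PySem.List.pyRange lo (lo + k) 1).sum = (2 * lo + k - 1) * k := by
  induction k with
  | zero => intro lo; rw [PySem.List.pyRange_one_eq_nil (by omega : lo + ((0:Nat):Int) ≤ lo)]; simp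
  | succ k ih =>
    intro lo
    have h1 : lo + (k + 1 : Nat) = (lo + k) + 1 := by push_cast; ring
    rw [h1, PySem.List.pyRange_one_succ_right (by omega : lo ≤ lo + k), List.sum_append]
    simp only [List.sum_cons, List.sum_nil]
    have := ih lo
    push_cast
    push_cast at this
    ring_nf
    ring_nf at this
    omega

theorem pv_series (mult lo hi : Int) (hlh : lo ≤ hi) :
    ((PySem.List.pyRange lo (hi + 1) 1).map (· * mult)).sum =
      PySem.Int.floordiv (mult * (lo + hi) * (hi - lo + 1)) 2 := by
  have hk : hi + 1 = lo + ((hi + 1 - lo).toNat : Int) := by omega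
  have h2 := pv_two_mul_sum_range (hi + 1 - lo).toNat lo
  have hsum : 2 * (PySem.List.pyRange lo (hi + 1) 1).sum = (lo + hi) * (hi - lo + 1) := by
    rw [hk, h2]
    have : ((hi + 1 - lo).toNat : Int) = hi + 1 - lo := by omega
    rw [this]; ring
  have hmap : ((PySem.List.pyRange lo (hi + 1) 1).map (· * mult)).sum =
      (PySem.List.pyRange lo (hi + 1) 1).sum * mult := by
    induction (PySem.List.pyRange lo (hi + 1) 1) with
    | nil => simp
    | cons y ys ihy => simp [ihy]; ring
  rw [hmap, PySem.Int.floordiv_eq_ediv_of_pos (by norm_num : (0:Int) < 2)]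
  have : mult * (lo + hi) * (hi - lo + 1) = 2 * ((PySem.List.pyRange lo (hi + 1) 1).sum * mult) := by
    rw [show (2:Int) * ((PySem.List.pyRange lo (hi + 1) 1).sum * mult)
        = (2 * (PySem.List.pyRange lo (hi + 1) 1).sum) * mult by ring, hsum]; ring
  rw [this, Int.mul_ediv_cancel_left _ (by norm_num : (2:Int) ≠ 0)]

-- the already-used ids in the interval: range-side sum = used_ids-side sum
theorem pv_dup_eq (mult lo hi : Int) (hm : 0 < mult) (used : List Int) (hu : used.Nodup) :
    (((PySem.List.pyRange lo (hi + 1) 1).filter (fun n => !decide (n * mult ∉ used))).map (· * mult)).sum =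
      (used.filter (fun i => PySem.Int.mod i mult == 0 && decide (lo ≤ PySem.Int.floordiv i mult)
        && decide (PySem.Int.floordiv i mult ≤ hi))).sum := by
  have hmne : mult ≠ 0 := by omega
  have hinj : Function.Injective (· * mult) := fun a b h => mul_right_cancel₀ hmne h
  apply List.Perm.sum_eq
  refine (List.perm_ext_iff_of_nodup
    (((PySem.List.nodup_pyRange_one lo (hi + 1)).filter _).map hinj) (hu.filter _)).mpr ?_
  intro i
  simp only [List.mem_map, List.mem_filter, PySem.List.mem_pyRange_one,
    Bool.not_eq_true', decide_eq_false_iff_not, not_not, Bool.and_eq_true, beq_iff_eq,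
    decide_eq_true_eq]
  constructor
  · rintro ⟨n, ⟨⟨hlo, hhi⟩, hmem⟩, rfl⟩
    have hdv : mult ∣ n * mult := Dvd.intro_left n rfl
    have hq : PySem.Int.floordiv (n * mult) mult = n := by
      rw [PySem.Int.floordiv_eq_ediv_of_pos hm, Int.mul_ediv_cancel n hmne]
    refine ⟨hmem, ⟨(PySem.Int.mod_eq_zero_iff_dvd _ _).mpr hdv, by omega⟩, by omega⟩
  · rintro ⟨hmem, ⟨hmod, hlo⟩, hhi⟩
    have hdv := (PySem.Int.mod_eq_zero_iff_dvd _ _).mp hmod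
    have hq : i / mult * mult = i := Int.ediv_mul_cancel hdv
    rw [PySem.Int.floordiv_eq_ediv_of_pos hm] at hlo hhi
    exact ⟨i / mult, ⟨⟨hlo, by omega⟩, by rwa [hq]⟩, hq⟩

-- foldl (· + ·) 0 is List.sum
theorem pv_foldl_sum (l : List Int) : l.foldl (· + ·) 0 = l.sum := by
  simp [List.sum_eq_foldl]

-- ===== VERDICT (by name: the statement is the Claim_ definition above) =====
theorem repetition_sum_py_spec : Claim_equal_repetition_sum_py := by
  intro start end_ digits repetitions used_ids _hdom hpre
  obtain ⟨hr, hd, hnd⟩ := hpre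
  unfold Spec_repetition_sum_py repetition_sum_py repetition_sum_py_alt pvCeilDiv
  have hh : (1 : Int) ≤ (10 : Int) ^ (PySem.Int.floordiv digits repetitions).toNat :=
    one_le_pow₀ (by norm_num)
  set h : Int := (10 : Int) ^ (PySem.Int.floordiv digits repetitions).toNat with hhdef
  have hmeq := pv_mult_eq h repetitions hh hr
  set mult : Int := if h = 1 then repetitions
    else PySem.Int.floordiv (h ^ repetitions.toNat - 1) (h - 1) with hmdef
  have hmpos : 0 < mult := by
    rw [hmeq]
    exact pvG_pos h hh repetitions.toNat (by omega)
  rw [pv_loop_equiv start end_ h repetitions mult _ _ used_ids hmpos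
    (fun n => by rw [pv_construct_eq h repetitions n hr, hmeq])]
  rw [pvLoopB_closed mult (by omega) _ 0 used_ids (PySem.List.nodup_pyRange_one _ _)]
  set power : Int := h ^ (repetitions - 1).toNat with hpdef
  set lo : Int := max (PySem.Int.floordiv start power) (-(PySem.Int.floordiv (-start) mult)) with hlodef
  set hi : Int := min (PySem.Int.floordiv end_ power) (PySem.Int.floordiv end_ mult) with hhidef
  by_cases hcase : hi < lo
  · rw [if_pos hcase, PySem.List.pyRange_one_eq_nil (by omega)]
    simp
  · rw [if_neg hcase]
    rw [pv_filter_split (fun n => decide (n * mult ∉ used_ids)) (· * mult)]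
    rw [pv_series mult lo hi (by omega), pv_dup_eq mult lo hi hmpos used_ids hnd,
      pv_foldl_sum]
    ring
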